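-- pv_equiv track=rewrite | github.com/yannickloth/W33-Theory | tools/map_edges_to_we6_orbits.py | find_h12_triangles
-- ===== SOURCE A (Python) =====
-- from itertools import combinations, product
--
-- def find_h12_triangles(adj, v0=0):
--     n = len(adj)
--     nbrs = [j for j in range(n) if adj[v0][j] == 1]
--     tris = []
--     for a, b, c in combinations(nbrs, 3):
--         if adj[a][b] and adj[a][c] and adj[b][c]:
--             tris.append(tuple(sorted((a, b, c))))
--     tris = sorted(tris)
--     return nbrs, tris
-- ===== SOURCE B (Python) =====
-- def find_h12_triangles(adj, v0=0):
--     n = len(adj)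
--     nbrs = [j for j in range(n) if adj[v0][j] == 1]
--     # adjacency sets restricted to the neighborhood of v0
--     nsets = {a: {b for b in nbrs if adj[a][b]} for a in nbrs}
--     tris = []
--     for i, a in enumerate(nbrs):
--         for b in nbrs[i + 1:]:
--             if b in nsets[a]:
--                 for c in sorted(nsets[a] & nsets[b]):
--                     if c > b:
--                         tris.append((a, b, c))
--     return nbrs, tris
-- ===== Notes on version B (the rewrite author's own statement) =====
-- stated objective: alternative
-- what changed: A filters all C(k,3) combinations of v0's neighbors with three adjacency tests; B precomputes per-neighbor adjacency sets and enumerates triangles by the edge-iterator method (for each pair a<b with b in N(a), emit the common neighbors c>b of a and b from the sorted set intersection), which yields the triples already in A's sorted order.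
-- outside the precondition, e.g. on find_h12_triangles([[1, 1], [1]], 0): A returns ([0, 1], []), B raises IndexError
import Mathlib
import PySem

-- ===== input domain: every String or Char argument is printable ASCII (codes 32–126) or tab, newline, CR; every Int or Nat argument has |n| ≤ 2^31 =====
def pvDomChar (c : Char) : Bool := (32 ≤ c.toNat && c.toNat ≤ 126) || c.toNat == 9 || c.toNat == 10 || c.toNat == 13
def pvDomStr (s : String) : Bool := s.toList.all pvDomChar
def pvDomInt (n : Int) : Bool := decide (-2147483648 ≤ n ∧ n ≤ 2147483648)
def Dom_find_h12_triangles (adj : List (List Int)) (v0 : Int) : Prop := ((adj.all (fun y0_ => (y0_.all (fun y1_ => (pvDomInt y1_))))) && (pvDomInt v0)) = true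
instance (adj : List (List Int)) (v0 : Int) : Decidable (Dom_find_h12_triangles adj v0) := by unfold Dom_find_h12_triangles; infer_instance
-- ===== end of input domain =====

-- B replaces A's scan of all C(k,3) neighbor triples by the edge-iterator method over
-- precomputed adjacency sets (for each neighbor pair a<b, triangles are the common
-- neighbors c>b of a and b); objective: alternative algorithm, not claimed faster.

-- ===== PORT A =====
-- tuple(sorted((a,b,c))) for a 3-element list
def pvSort3 (t : List Int) : Int × Int × Int :=
  match PySem.List.sorted t (fun x => x) with
  | [a, b, c] => (a, b, c)
  | _ => (0, 0, 0)

-- Python compares int-triples lexicographically; Lean's Prod '<' is a different order,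
-- so sorted(tris) is ported as the same stable insertion sort (PySem.List.insertBy,
-- cf. PySem.List.sorted_eq_foldl_insertBy) with the explicit lexicographic comparator — exact.
def pvLex3 (s t : Int × Int × Int) : Bool :=
  decide (s.1 < t.1) || (s.1 == t.1 && (decide (s.2.1 < t.2.1) || (s.2.1 == t.2.1 && decide (s.2.2 < t.2.2))))

def find_h12_triangles (adj : List (List Int)) (v0 : Int) : List Int × (List (Int × Int × Int)) :=
  let n : Int := adj.length
  let nbrs : List Int := (PySem.List.pyRange 0 n 1).filter
      (fun j => PySem.List.pyGetD (PySem.List.pyGetD adj v0 []) j 0 == 1)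
  let tris : List (Int × Int × Int) :=
    (PySem.List.combinations nbrs 3).foldl (fun acc t =>
      match t with
      | [a, b, c] =>
          if (PySem.List.pyGetD (PySem.List.pyGetD adj a []) b 0 != 0) &&
             (PySem.List.pyGetD (PySem.List.pyGetD adj a []) c 0 != 0) &&
             (PySem.List.pyGetD (PySem.List.pyGetD adj b []) c 0 != 0) then
            acc ++ [pvSort3 [a, b, c]]
          else acc
      | _ => acc) []
  (nbrs, tris.foldl (fun acc t => PySem.List.insertBy pvLex3 t acc) [])

-- ===== PORT B =====
def find_h12_triangles_alt (adj : List (List Int)) (v0 : Int) : List Int × (List (Int × Int × Int)) :=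
  let n : Int := adj.length
  let nbrs : List Int := (PySem.List.pyRange 0 n 1).filter
      (fun j => PySem.List.pyGetD (PySem.List.pyGetD adj v0 []) j 0 == 1)
  let nsets : PySem.Dict Int (PySem.Set Int) :=
    nbrs.foldl (fun d a => d.insert a
      (PySem.Set.ofList (nbrs.filter (fun b => PySem.List.pyGetD (PySem.List.pyGetD adj a []) b 0 != 0))))
      PySem.Dict.empty
  let tris : List (Int × Int × Int) :=
    (PySem.List.enumerate nbrs).foldl (fun acc p =>
      (PySem.List.slice nbrs (some (p.1 + 1)) none).foldl (fun acc b =>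
        if PySem.Set.contains (nsets.getD p.2 PySem.Set.empty) b then
          (PySem.List.sorted
              (PySem.Set.inter (nsets.getD p.2 PySem.Set.empty) (nsets.getD b PySem.Set.empty))
              (fun x => x)).foldl
            (fun acc c => if b < c then acc ++ [(p.2, b, c)] else acc) acc
        else acc) acc) []
  (nbrs, tris)

-- ===== PRECONDITION & SPEC =====
-- Pre_ admits empty adj (Python indexes nothing there) and otherwise excludes inputs
-- where Python A raises IndexError (v0 out of range, or v0's row
-- shorter than len(adj)), and additionally requires row j to be readable at column i for
-- EVERY ordered pair (j, i) of neighbors of v0: exactly the entries B's adjacency-set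
-- precomputation reads, where A's short-circuited triple loop reads fewer and can
-- return on some ragged matrices (see cites).
def Pre_find_h12_triangles (adj : List (List Int)) (v0 : Int) : Prop :=
  adj = [] ∨
  (PySem.Raise.InRange adj.length v0 ∧
  adj.length ≤ (PySem.List.pyGetD adj v0 []).length ∧
  ∀ j : Nat, j < adj.length → (PySem.List.pyGetD adj v0 []).getD j 0 = 1 →
    ∀ i : Nat, i < adj.length → (PySem.List.pyGetD adj v0 []).getD i 0 = 1 →
      i < (adj.getD j []).length)
instance (adj : List (List Int)) (v0 : Int) : Decidable (Pre_find_h12_triangles adj v0) := by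
  unfold Pre_find_h12_triangles; infer_instance

def pvWitness_find_h12_triangles : List (List Int) × Int :=
  ([[0, 1, 1, 1], [1, 1, 1, 1], [1, 1, 1, 1], [1, 1, 1, 1]], 0)

def Spec_find_h12_triangles (adj : List (List Int)) (v0 : Int) (out : List Int × (List (Int × Int × Int))) : Prop := out = find_h12_triangles_alt adj v0
instance (adj : List (List Int)) (v0 : Int) (out : List Int × (List (Int × Int × Int))) : Decidable (Spec_find_h12_triangles adj v0 out) := by unfold Spec_find_h12_triangles; infer_instance

-- ===== CLAIM (what is proved, stated in full; the proofs are below) =====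
def Claim_equal_find_h12_triangles : Prop := ∀ (adj : List (List Int)) (v0 : Int), Dom_find_h12_triangles adj v0 → Pre_find_h12_triangles adj v0 → Spec_find_h12_triangles adj v0 (find_h12_triangles adj v0)

-- ===== LEMMAS AND PROOFS =====

-- the edge test both ports perform (truthiness of adj[x][y])
def pvE (adj : List (List Int)) (x y : Int) : Bool :=
  PySem.List.pyGetD (PySem.List.pyGetD adj x []) y 0 != 0

-- the triangle test of A's inner loop, over an abstract edge relation E
def pvP (E : Int → Int → Bool) (t : Int × Int × Int) : Bool :=
  E t.1 t.2.1 && E t.1 t.2.2 && E t.2.1 t.2.2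

-- index-lexicographic pairs and triples of a list (the order of itertools.combinations)
def pvPairs : List Int → List (Int × Int)
  | [] => []
  | b :: r => r.map (fun c => (b, c)) ++ pvPairs r

def pvTrips : List Int → List (Int × Int × Int)
  | [] => []
  | a :: r => (pvPairs r).map (fun p => (a, p.1, p.2)) ++ pvTrips r

theorem pv_comb2 (l : List Int) :
    PySem.List.combinations l 2 = (pvPairs l).map (fun p => [p.1, p.2]) := by
  induction l with
  | nil => simp [pvPairs, PySem.List.combinations_nil_succ]
  | cons b r ih =>
      rw [show (2 : Nat) = 1 + 1 from rfl, PySem.List.combinations_cons_succ,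
        PySem.List.combinations_one, ih]
      simp [pvPairs, List.map_map, Function.comp]

theorem pv_comb3 (l : List Int) :
    PySem.List.combinations l 3 = (pvTrips l).map (fun t => [t.1, t.2.1, t.2.2]) := by
  induction l with
  | nil => simp [pvTrips, PySem.List.combinations_nil_succ]
  | cons a r ih =>
      rw [show (3 : Nat) = 2 + 1 from rfl, PySem.List.combinations_cons_succ,
        pv_comb2, ih]
      simp [pvTrips, List.map_map, Function.comp]

theorem pv_pairs_mem (l : List Int) (p : Int × Int) (hp : p ∈ pvPairs l) :
    p.1 ∈ l ∧ p.2 ∈ l := by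
  induction l with
  | nil => simp [pvPairs] at hp
  | cons b r ih =>
      simp only [pvPairs, List.mem_append, List.mem_map] at hp
      rcases hp with ⟨c, hc, rfl⟩ | hp
      · exact ⟨List.mem_cons_self, List.mem_cons_of_mem _ hc⟩
      · exact ⟨List.mem_cons_of_mem _ (ih hp).1, List.mem_cons_of_mem _ (ih hp).2⟩

theorem pv_trips_mem (l : List Int) (t : Int × Int × Int) (ht : t ∈ pvTrips l) :
    t.1 ∈ l ∧ t.2.1 ∈ l ∧ t.2.2 ∈ l := by
  induction l with
  | nil => simp [pvTrips] at ht
  | cons a r ih =>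
      simp only [pvTrips, List.mem_append, List.mem_map] at ht
      rcases ht with ⟨p, hp, rfl⟩ | ht
      · have := pv_pairs_mem r p hp
        exact ⟨List.mem_cons_self, List.mem_cons_of_mem _ this.1, List.mem_cons_of_mem _ this.2⟩
      · exact ⟨List.mem_cons_of_mem _ (ih ht).1, List.mem_cons_of_mem _ (ih ht).2.1,
          List.mem_cons_of_mem _ (ih ht).2.2⟩

theorem pv_pairs_lt (l : List Int) (h : l.Pairwise (· < ·)) (p : Int × Int)
    (hp : p ∈ pvPairs l) : p.1 < p.2 := by
  induction l with
  | nil => simp [pvPairs] at hp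
  | cons b r ih =>
      rcases List.pairwise_cons.mp h with ⟨hb, hr⟩
      simp only [pvPairs, List.mem_append, List.mem_map] at hp
      rcases hp with ⟨c, hc, rfl⟩ | hp
      · exact hb c hc
      · exact ih hr hp

theorem pv_trips_lt (l : List Int) (h : l.Pairwise (· < ·)) (t : Int × Int × Int)
    (ht : t ∈ pvTrips l) : t.1 < t.2.1 ∧ t.2.1 < t.2.2 := by
  induction l with
  | nil => simp [pvTrips] at ht
  | cons a r ih =>
      rcases List.pairwise_cons.mp h with ⟨ha, hr⟩
      simp only [pvTrips, List.mem_append, List.mem_map] at ht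
      rcases ht with ⟨p, hp, rfl⟩ | ht
      · exact ⟨ha p.1 (pv_pairs_mem r p hp).1, pv_pairs_lt r hr p hp⟩
      · exact ih hr ht

theorem pv_sort3_id (a b c : Int) (h1 : a < b) (h2 : b < c) :
    pvSort3 [a, b, c] = (a, b, c) := by
  unfold pvSort3
  rw [PySem.List.sorted_eq_self_of_pairwise]
  simp
  constructor
  · exact ⟨le_of_lt h1, le_of_lt (h1.trans h2)⟩
  · simp [le_of_lt h2]

-- the Prop form of the lexicographic comparator
theorem pv_lex3_iff (s t : Int × Int × Int) :
    pvLex3 s t = true ↔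
      s.1 < t.1 ∨ (s.1 = t.1 ∧ (s.2.1 < t.2.1 ∨ (s.2.1 = t.2.1 ∧ s.2.2 < t.2.2))) := by
  simp [pvLex3]

theorem pv_lex3_asymm (s t : Int × Int × Int) (h : pvLex3 s t = true) :
    pvLex3 t s = false := by
  rw [pv_lex3_iff] at h
  rcases Bool.eq_false_or_eq_true (pvLex3 t s) with ht | hf
  · rw [pv_lex3_iff] at ht; omega
  · exact hf

theorem pv_pw_pairs (l : List Int) (h : l.Pairwise (· < ·)) :
    (pvPairs l).Pairwise (fun p q => p.1 < q.1 ∨ (p.1 = q.1 ∧ p.2 < q.2)) := by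
  induction l with
  | nil => simp [pvPairs]
  | cons b r ih =>
      rcases List.pairwise_cons.mp h with ⟨hb, hr⟩
      rw [pvPairs, List.pairwise_append]
      refine ⟨?_, ih hr, ?_⟩
      · rw [List.pairwise_map]
        exact hr.imp (fun hlt => Or.inr ⟨rfl, hlt⟩)
      · rintro p hp q hq
        rcases List.mem_map.mp hp with ⟨c, _, rfl⟩
        exact Or.inl (hb q.1 (pv_pairs_mem r q hq).1)

theorem pv_pw_trips (l : List Int) (h : l.Pairwise (· < ·)) :
    (pvTrips l).Pairwise (fun s t => pvLex3 s t = true) := by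
  induction l with
  | nil => simp [pvTrips]
  | cons a r ih =>
      rcases List.pairwise_cons.mp h with ⟨ha, hr⟩
      rw [pvTrips, List.pairwise_append]
      refine ⟨?_, ih hr, ?_⟩
      · rw [List.pairwise_map]
        refine (pv_pw_pairs r hr).imp ?_
        intro p q hpq
        rw [pv_lex3_iff]
        exact Or.inr ⟨rfl, hpq⟩
      · rintro s hs t ht
        rcases List.mem_map.mp hs with ⟨p, _, rfl⟩
        rw [pv_lex3_iff]
        exact Or.inl (ha t.1 (pv_trips_mem r t ht).1)

-- the fold of A's triple loop is a filter of the triple list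
theorem pvA_fold (adj : List (List Int)) (L : List (Int × Int × Int))
    (acc : List (Int × Int × Int)) :
    (L.map (fun t => [t.1, t.2.1, t.2.2])).foldl (fun acc t =>
      match t with
      | [a, b, c] =>
          if (PySem.List.pyGetD (PySem.List.pyGetD adj a []) b 0 != 0) &&
             (PySem.List.pyGetD (PySem.List.pyGetD adj a []) c 0 != 0) &&
             (PySem.List.pyGetD (PySem.List.pyGetD adj b []) c 0 != 0) then
            acc ++ [pvSort3 [a, b, c]]
          else acc
      | _ => acc) acc
    = acc ++ (L.filter (pvP (pvE adj))).map (fun t => pvSort3 [t.1, t.2.1, t.2.2]) := by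
  induction L generalizing acc with
  | nil => simp
  | cons t L ih =>
      rw [List.map_cons, List.foldl_cons]
      show (L.map (fun t => [t.1, t.2.1, t.2.2])).foldl _
          (if pvP (pvE adj) t = true then acc ++ [pvSort3 [t.1, t.2.1, t.2.2]] else acc) = _
      by_cases hc : pvP (pvE adj) t = true
      · rw [if_pos hc, ih, List.filter_cons_of_pos hc]
        simp
      · rw [if_neg hc, ih, List.filter_cons_of_neg hc]

-- insertion into an already lexicographically sorted accumulator appends at the end
theorem pv_insert_sorted (L : List (Int × Int × Int)) :
    ∀ (acc : List (Int × Int × Int)),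
      (∀ x ∈ acc, ∀ y ∈ L, pvLex3 x y = true) →
      L.Pairwise (fun s t => pvLex3 s t = true) →
      L.foldl (fun acc t => PySem.List.insertBy pvLex3 t acc) acc = acc ++ L := by
  induction L with
  | nil => intro acc _ _; simp
  | cons y L ih =>
      intro acc hacc hpw
      rcases List.pairwise_cons.mp hpw with ⟨hy, hL⟩
      rw [List.foldl_cons,
        PySem.List.insertBy_of_forall_not_before pvLex3 y acc
          (fun x hx => pv_lex3_asymm x y (hacc x hx y List.mem_cons_self)),
        ih (acc ++ [y]) ?_ hL]
      · simp
      · intro x hx z hz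
        rcases List.mem_append.mp hx with hx | hx
        · exact hacc x hx z (List.mem_cons_of_mem _ hz)
        · rw [List.mem_singleton.mp hx]; exact hy z hz

-- ===== B-side lemmas =====

theorem pv_getD_foldl_insert_not_mem {ν : Type} (l : List Int) (f : Int → ν)
    (a : Int) (ha : a ∉ l) (d0 : ν) :
    ∀ (d : PySem.Dict Int ν),
      (l.foldl (fun d x => d.insert x (f x)) d).getD a d0 = d.getD a d0 := by
  induction l with
  | nil => intro d; rfl
  | cons x l ih =>
      intro d
      rw [List.foldl_cons, ih (fun h => ha (List.mem_cons_of_mem _ h)),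
        PySem.Dict.getD_insert_of_ne d (f x) d0 (by rintro rfl; exact ha List.mem_cons_self)]

theorem pv_getD_foldl_insert_mem {ν : Type} (l : List Int) (f : Int → ν)
    (a : Int) (ha : a ∈ l) (hnd : l.Nodup) (d0 : ν) (d : PySem.Dict Int ν) :
    (l.foldl (fun d x => d.insert x (f x)) d).getD a d0 = f a := by
  induction l generalizing d with
  | nil => simp at ha
  | cons x l ih =>
      rw [List.foldl_cons]
      rcases List.mem_cons.mp ha with rfl | ha'
      · rw [pv_getD_foldl_insert_not_mem l f a (List.nodup_cons.mp hnd).1 d0,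
          PySem.Dict.getD_insert_self]
      · exact ih ha' (List.nodup_cons.mp hnd).2 _

theorem pv_contains_filter (l : List Int) (p : Int → Bool) (b : Int) (hb : b ∈ l) :
    PySem.Set.contains (l.filter p) b = p b := by
  by_cases hp : p b = true
  · rw [hp]
    exact PySem.Set.contains_iff _ _ |>.mpr (List.mem_filter.mpr ⟨hb, hp⟩)
  · rw [Bool.eq_false_iff.mpr hp]
    rcases Bool.eq_false_or_eq_true (PySem.Set.contains (l.filter p) b) with hc | hc
    · exact absurd (List.mem_filter.mp ((PySem.Set.contains_iff _ _).mp hc)).2 hp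
    · exact hc

theorem pv_inter_filters (l : List Int) (pa pb : Int → Bool) (hnd : l.Nodup) :
    PySem.Set.inter (PySem.Set.ofList (l.filter pa)) (PySem.Set.ofList (l.filter pb))
      = l.filter (fun x => pa x && pb x) := by
  rw [PySem.Set.ofList_eq_self_of_nodup _ (hnd.filter pa),
    PySem.Set.ofList_eq_self_of_nodup _ (hnd.filter pb)]
  show (l.filter pa).filter (fun x => PySem.Set.contains (l.filter pb) x) = _
  rw [List.filter_filter]
  refine List.filter_congr ?_
  intro x hx
  rw [pv_contains_filter l pb x hx]
  exact Bool.and_comm _ _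

theorem pv_suffix_filter (N : List Int) (h : N.Pairwise (· < ·)) (b : Int) (r : List Int)
    (hs : (b :: r) <:+ N) : N.filter (fun c => decide (b < c)) = r := by
  obtain ⟨pre, rfl⟩ := hs
  rw [List.filter_append]
  rcases List.pairwise_append.mp h with ⟨_, hbr, hcross⟩
  rcases List.pairwise_cons.mp hbr with ⟨hbelem, _⟩
  have h1 : pre.filter (fun c => decide (b < c)) = [] := by
    rw [List.filter_eq_nil_iff]
    intro x hx
    simp only [decide_eq_true_eq]
    exact fun hbx => absurd (hcross x hx b List.mem_cons_self) (by omega)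
  have h2 : (b :: r).filter (fun c => decide (b < c)) = r := by
    rw [List.filter_cons_of_neg (by simp), List.filter_eq_self.mpr]
    intro x hx
    simpa using hbelem x hx
  rw [h1, h2, List.nil_append]

-- the run of suffixes a Python 'for i, a in enumerate(l): ... l[i+1:] ...' visits
def pvSufFold {β : Type} (f : Int → List Int → β → β) : List Int → β → β
  | [], acc => acc
  | a :: r, acc => pvSufFold f r (f a r acc)

def pvSufFlat (g : Int → List Int → List (Int × Int × Int)) :
    List Int → List (Int × Int × Int)
  | [] => []
  | a :: r => g a r ++ pvSufFlat g r

theorem pv_enum_fold {β : Type} (L : List Int) (f : Int → List Int → β → β) :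
    ∀ (l : List Int) (k : Nat), L.drop k = l → ∀ (acc : β),
      (PySem.List.enumerate l (k : Int)).foldl
          (fun acc p => f p.2 (PySem.List.slice L (some (p.1 + 1)) none) acc) acc
        = pvSufFold f l acc := by
  intro l
  induction l with
  | nil => intro k _ acc; rw [PySem.List.enumerate_nil]; rfl
  | cons a r ih =>
      intro k hk acc
      rw [PySem.List.enumerate_cons, List.foldl_cons]
      have hdrop : L.drop (k + 1) = r := by
        have : (L.drop k).drop 1 = L.drop (k + 1) := by
          rw [List.drop_drop]
        rw [← this, hk, List.drop_one, List.tail_cons]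
      have hcast : ((k : Int) + 1) = ((k + 1 : Nat) : Int) := by push_cast; ring
      have hslice : PySem.List.slice L (some ((k : Int) + 1)) none = r := by
        rw [hcast, PySem.List.slice_from_natCast, hdrop]
      rw [hslice, hcast]
      exact ih (k + 1) hdrop (f a r acc)

theorem pv_sufFold_flat (f : Int → List Int → List (Int × Int × Int) → List (Int × Int × Int))
    (g : Int → List Int → List (Int × Int × Int))
    (h : ∀ a r acc, f a r acc = acc ++ g a r) :
    ∀ (l : List Int) (acc : List (Int × Int × Int)),
      pvSufFold f l acc = acc ++ pvSufFlat g l := by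
  intro l
  induction l with
  | nil => intro acc; simp [pvSufFold, pvSufFlat]
  | cons a r ih =>
      intro acc
      rw [pvSufFold, pvSufFlat, ih (f a r acc), h a r acc, List.append_assoc]

-- Prop-conditioned variant of PySem.List.foldl_append_if (the test 'b < c' is a
-- decidable Prop in the port, not a stored Bool)
theorem pv_foldl_append_ite {α β : Type} (p : α → Prop) [DecidablePred p] (f : α → β) :
    ∀ (l : List α) (acc : List β),
      l.foldl (fun acc x => if p x then acc ++ [f x] else acc) acc
        = acc ++ (l.filter (fun x => decide (p x))).map f := by
  intro l
  induction l with
  | nil => intro acc; simp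
  | cons x l ih =>
      intro acc
      rw [List.foldl_cons]
      by_cases hx : p x
      · rw [if_pos hx, ih, List.filter_cons_of_pos (by simpa using hx)]
        simp
      · rw [if_neg hx, ih, List.filter_cons_of_neg (by simpa using hx)]

-- B's b-loop over a suffix r of N equals A's filtered pair list for the outer vertex a
theorem pv_pairs_level (E : Int → Int → Bool) (N : List Int) (NS : Int → PySem.Set Int)
    (hN : N.Pairwise (· < ·))
    (hNS : ∀ x ∈ N, NS x = PySem.Set.ofList (N.filter (fun y => E x y)))
    (a : Int) (ha : a ∈ N) :
    ∀ (r : List Int), r <:+ N →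
      r.flatMap (fun b =>
        if PySem.Set.contains (NS a) b = true then
          ((PySem.List.sorted (PySem.Set.inter (NS a) (NS b)) (fun x => x)).filter
            (fun c => decide (b < c))).map (fun c => (a, b, c))
        else [])
      = ((pvPairs r).map (fun p => (a, p.1, p.2))).filter (pvP E) := by
  have hnd : N.Nodup := hN.imp ne_of_lt
  intro r
  induction r with
  | nil => intro _; simp [pvPairs]
  | cons b r' ih =>
      intro hs
      have hb : b ∈ N := hs.sublist.subset List.mem_cons_self
      have hr' : r' <:+ N := by
        obtain ⟨pre, hpre⟩ := hs
        exact ⟨pre ++ [b], by simp [hpre.symm]⟩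
      have hhead :
          (if PySem.Set.contains (NS a) b = true then
            ((PySem.List.sorted (PySem.Set.inter (NS a) (NS b)) (fun x => x)).filter
              (fun c => decide (b < c))).map (fun c => (a, b, c))
          else [])
          = ((r'.map (fun c => (b, c))).map (fun p => (a, p.1, p.2))).filter (pvP E) := by
        have hcont : PySem.Set.contains (NS a) b = E a b := by
          rw [hNS a ha, PySem.Set.ofList_eq_self_of_nodup _ (hnd.filter _),
            pv_contains_filter N _ b hb]
        have hinter :
            (PySem.List.sorted (PySem.Set.inter (NS a) (NS b)) (fun x => x)).filter
              (fun c => decide (b < c))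
            = r'.filter (fun c => E a c && E b c) := by
          rw [hNS a ha, hNS b hb, pv_inter_filters N _ _ hnd,
            PySem.List.sorted_eq_self_of_pairwise _ _
              (((hN.filter _).imp le_of_lt : _)),
            List.filter_filter]
          rw [List.filter_congr (fun x _ => Bool.and_comm (decide (b < x)) (E a x && E b x)),
            ← List.filter_filter, pv_suffix_filter N hN b r' hs]
        rw [List.map_map, List.filter_map, hcont, hinter]
        by_cases hab : E a b = true
        · rw [if_pos hab]
          refine congrArg _ (List.filter_congr ?_)
          intro c _
          simp [pvP, Function.comp, hab]
        · rw [if_neg hab, List.filter_eq_nil_iff.mpr, List.map_nil]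
          intro c _
          simp [pvP, Function.comp]
          intro h1
          exact absurd h1 (by simpa using hab)
      rw [List.flatMap_cons, hhead, ih hr', pvPairs, List.map_append, List.filter_append]

-- B's whole suffix loop equals A's filtered triple list
theorem pv_trips_level (E : Int → Int → Bool) (N : List Int) (NS : Int → PySem.Set Int)
    (hN : N.Pairwise (· < ·))
    (hNS : ∀ x ∈ N, NS x = PySem.Set.ofList (N.filter (fun y => E x y))) :
    ∀ (l : List Int), l <:+ N →
      pvSufFlat (fun a r =>
        r.flatMap (fun b =>
          if PySem.Set.contains (NS a) b = true then
            ((PySem.List.sorted (PySem.Set.inter (NS a) (NS b)) (fun x => x)).filter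
              (fun c => decide (b < c))).map (fun c => (a, b, c))
          else [])) l
      = (pvTrips l).filter (pvP E) := by
  intro l
  induction l with
  | nil => intro _; simp [pvSufFlat, pvTrips]
  | cons a r ih =>
      intro hs
      have ha : a ∈ N := hs.sublist.subset List.mem_cons_self
      have hr : r <:+ N := by
        obtain ⟨pre, hpre⟩ := hs
        exact ⟨pre ++ [a], by simp [hpre.symm]⟩
      rw [pvSufFlat, pv_pairs_level E N NS hN hNS a ha r hr, ih hr, pvTrips,
        List.filter_append]

-- the neighbor list both ports build
def pvNbrs (adj : List (List Int)) (v0 : Int) : List Int :=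
  (PySem.List.pyRange 0 adj.length 1).filter
    (fun j => PySem.List.pyGetD (PySem.List.pyGetD adj v0 []) j 0 == 1)

-- B's adjacency-set lookup nsets[x]
def pvNS (adj : List (List Int)) (v0 : Int) (x : Int) : PySem.Set Int :=
  ((pvNbrs adj v0).foldl (fun d a => d.insert a
      (PySem.Set.ofList ((pvNbrs adj v0).filter (fun b => pvE adj a b))))
    PySem.Dict.empty).getD x PySem.Set.empty

-- B's b-loop body and its flatMap form
def pvFB (adj : List (List Int)) (v0 : Int) (a : Int) (s : List Int)
    (acc : List (Int × Int × Int)) : List (Int × Int × Int) :=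
  s.foldl (fun acc b =>
    if PySem.Set.contains (pvNS adj v0 a) b = true then
      (PySem.List.sorted (PySem.Set.inter (pvNS adj v0 a) (pvNS adj v0 b)) (fun x => x)).foldl
        (fun acc c => if b < c then acc ++ [(a, b, c)] else acc) acc
    else acc) acc

def pvGB (adj : List (List Int)) (v0 : Int) (a : Int) (r : List Int) :
    List (Int × Int × Int) :=
  r.flatMap (fun b =>
    if PySem.Set.contains (pvNS adj v0 a) b = true then
      ((PySem.List.sorted (PySem.Set.inter (pvNS adj v0 a) (pvNS adj v0 b)) (fun x => x)).filter
        (fun c => decide (b < c))).map (fun c => (a, b, c))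
    else [])

theorem pv_nbrs_pairwise (adj : List (List Int)) (v0 : Int) :
    (pvNbrs adj v0).Pairwise (· < ·) :=
  List.Pairwise.filter _ (PySem.List.pairwise_lt_pyRange_one 0 _)

theorem pv_A_char (adj : List (List Int)) (v0 : Int) :
    find_h12_triangles adj v0
      = (pvNbrs adj v0, (pvTrips (pvNbrs adj v0)).filter (pvP (pvE adj))) := by
  have hpw := pv_nbrs_pairwise adj v0
  show (pvNbrs adj v0,
      ((PySem.List.combinations (pvNbrs adj v0) 3).foldl (fun acc t =>
        match t with
        | [a, b, c] =>
            if (PySem.List.pyGetD (PySem.List.pyGetD adj a []) b 0 != 0) &&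
               (PySem.List.pyGetD (PySem.List.pyGetD adj a []) c 0 != 0) &&
               (PySem.List.pyGetD (PySem.List.pyGetD adj b []) c 0 != 0) then
              acc ++ [pvSort3 [a, b, c]]
            else acc
        | _ => acc) []).foldl (fun acc t => PySem.List.insertBy pvLex3 t acc) []) = _
  rw [pv_comb3, pvA_fold adj (pvTrips (pvNbrs adj v0)) [], List.nil_append]
  have hmap : ((pvTrips (pvNbrs adj v0)).filter (pvP (pvE adj))).map
      (fun t => pvSort3 [t.1, t.2.1, t.2.2]) = (pvTrips (pvNbrs adj v0)).filter (pvP (pvE adj)) := by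
    conv_rhs => rw [← List.map_id ((pvTrips (pvNbrs adj v0)).filter (pvP (pvE adj)))]
    refine List.map_congr_left ?_
    intro t ht
    have hlt := pv_trips_lt _ hpw t (List.mem_of_mem_filter ht)
    rw [pv_sort3_id t.1 t.2.1 t.2.2 hlt.1 hlt.2]
    rfl
  rw [hmap, pv_insert_sorted _ [] (by intro x hx; simp at hx)
    ((pv_pw_trips _ hpw).filter _), List.nil_append]

theorem pv_B_char (adj : List (List Int)) (v0 : Int) :
    find_h12_triangles_alt adj v0
      = (pvNbrs adj v0, (pvTrips (pvNbrs adj v0)).filter (pvP (pvE adj))) := by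
  have hpw := pv_nbrs_pairwise adj v0
  have hnd : (pvNbrs adj v0).Nodup := hpw.imp ne_of_lt
  have hNS : ∀ x ∈ pvNbrs adj v0,
      pvNS adj v0 x = PySem.Set.ofList ((pvNbrs adj v0).filter (fun y => pvE adj x y)) := by
    intro x hx
    exact pv_getD_foldl_insert_mem (pvNbrs adj v0)
      (fun a => PySem.Set.ofList ((pvNbrs adj v0).filter (fun b => pvE adj a b)))
      x hx hnd PySem.Set.empty PySem.Dict.empty
  have hfg : ∀ a r acc, pvFB adj v0 a r acc = acc ++ pvGB adj v0 a r := by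
    intro a r acc
    refine Eq.trans (PySem.List.foldl_congr_mem' r _
      (fun acc b => acc ++ (if PySem.Set.contains (pvNS adj v0 a) b = true then
        ((PySem.List.sorted (PySem.Set.inter (pvNS adj v0 a) (pvNS adj v0 b)) (fun x => x)).filter
          (fun c => decide (b < c))).map (fun c => (a, b, c))
      else [])) acc ?_) (PySem.List.foldl_append_eq_flatMap _ r acc)
    intro b _ acc'
    show (if PySem.Set.contains (pvNS adj v0 a) b = true then
        (PySem.List.sorted (PySem.Set.inter (pvNS adj v0 a) (pvNS adj v0 b)) (fun x => x)).foldl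
          (fun acc c => if b < c then acc ++ [(a, b, c)] else acc) acc'
      else acc')
      = acc' ++ (if PySem.Set.contains (pvNS adj v0 a) b = true then
        ((PySem.List.sorted (PySem.Set.inter (pvNS adj v0 a) (pvNS adj v0 b)) (fun x => x)).filter
          (fun c => decide (b < c))).map (fun c => (a, b, c)) else [])
    by_cases hc : PySem.Set.contains (pvNS adj v0 a) b = true
    · rw [if_pos hc, if_pos hc]
      exact pv_foldl_append_ite (fun c => b < c) (fun c => (a, b, c)) _ acc'
    · rw [if_neg hc, if_neg hc, List.append_nil]
  show (pvNbrs adj v0,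
      (PySem.List.enumerate (pvNbrs adj v0)).foldl (fun acc p =>
        pvFB adj v0 p.2 (PySem.List.slice (pvNbrs adj v0) (some (p.1 + 1)) none) acc) []) = _
  rw [Prod.mk.injEq]
  refine ⟨rfl, ?_⟩
  refine Eq.trans (pv_enum_fold (pvNbrs adj v0) (pvFB adj v0) (pvNbrs adj v0) 0 rfl []) ?_
  refine Eq.trans (pv_sufFold_flat (pvFB adj v0) (pvGB adj v0) hfg (pvNbrs adj v0) []) ?_
  rw [List.nil_append]
  exact pv_trips_level (pvE adj) (pvNbrs adj v0) (pvNS adj v0) hpw hNS (pvNbrs adj v0)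
    (List.suffix_refl _)

-- ===== VERDICT (by name: the statement is the Claim_ definition above) =====
theorem find_h12_triangles_spec : Claim_equal_find_h12_triangles := by
  intro adj v0 _ _
  show find_h12_triangles adj v0 = find_h12_triangles_alt adj v0
  rw [pv_A_char, pv_B_char]
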